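-- pv_equiv track=rewrite | github.com/bretthoffman/case_creator | domain/rules/material_rules.py | route_from_services
-- ===== SOURCE A (Python) =====
-- from typing import Any, Dict, List
--
-- ADZ_ROUTE_KEYWORDS = ("adzir", "argenz", "emax zirconia")
--
-- def route_from_services(services: List[Dict[str, Any]]) -> str:
--     """
--     Legacy route family:
--       - 'argen_envision' if service mentions Envision
--       - 'argen_adzir' if it mentions Adzir/ArgenZ (or 'emax zirconia')
--       - 'regular' otherwise
--     """
--     route = "regular"
--     for s in services or []:
--         desc = (s.get("description") or s.get("service_description") or "").lower()
--         if "envision" in desc: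
--             return "argen_envision"
--         if any(k in desc for k in ADZ_ROUTE_KEYWORDS):
--             route = "argen_adzir"
--     return route
-- ===== SOURCE B (Python) =====
-- from typing import Any, Dict, List
--
-- ADZ_ROUTE_KEYWORDS = ("adzir", "argenz", "emax zirconia")
--
-- def route_from_services(services: List[Dict[str, Any]]) -> str:
--     """Priority test over all services, as two lazy short-circuiting scans."""
--     def descs():
--         return ((s.get("description") or s.get("service_description") or "").lower()
--                 for s in services or [])
--     if any("envision" in d for d in descs()):
--         return "argen_envision"
--     if any(any(k in d for k in ADZ_ROUTE_KEYWORDS) for d in descs()):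
--         return "argen_adzir"
--     return "regular"
-- ===== Notes on version B (the rewrite author's own statement) =====
-- stated objective: alternative
-- what changed: Replaced A's single loop with an early return and a mutable 'route' accumulator by a priority chain of two short-circuiting any() scans over lazily computed descriptions, with no accumulator.
import Mathlib
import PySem

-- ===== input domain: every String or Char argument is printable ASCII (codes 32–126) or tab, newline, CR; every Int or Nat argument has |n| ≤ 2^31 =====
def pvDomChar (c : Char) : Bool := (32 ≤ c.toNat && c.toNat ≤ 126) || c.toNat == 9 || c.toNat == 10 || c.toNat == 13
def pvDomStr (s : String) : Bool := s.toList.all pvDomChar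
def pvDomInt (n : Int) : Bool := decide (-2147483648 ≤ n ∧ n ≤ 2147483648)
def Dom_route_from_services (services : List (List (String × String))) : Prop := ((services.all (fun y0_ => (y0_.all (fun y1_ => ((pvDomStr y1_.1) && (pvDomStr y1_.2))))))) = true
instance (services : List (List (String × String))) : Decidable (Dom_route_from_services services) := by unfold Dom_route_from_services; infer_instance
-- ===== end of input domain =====

-- B replaces A's single loop with a route accumulator and early return by a priority chain of two short-circuiting any-scans (alternative decomposition, same cost).


-- ===== PORT A =====
def ADZ_ROUTE_KEYWORDS : List String := ["adzir", "argenz", "emax zirconia"]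

-- s.get(k): first match in the association list (Python dict lookup)
def pvGetA (s : List (String × String)) (k : String) : Option String :=
  (s.find? (fun p => p.1 == k)).map (·.2)

-- Python 'x or y' where x : Option String (None and "" are falsy)
def pvOrA (a : Option String) (b : Option String) : Option String :=
  match a with
  | some s => if s = "" then b else some s
  | none => b

-- desc = (s.get("description") or s.get("service_description") or "").lower()
def descA (s : List (String × String)) : String :=
  PySem.Str.lower ((pvOrA (pvGetA s "description") (pvGetA s "service_description")).getD "")

-- the for-loop of A, with 'route' as accumulator and the early return
def routeLoopA (services : List (List (String × String))) (route : String) : String :=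
  match services with
  | [] => route
  | s :: rest =>
    let desc := descA s
    if PySem.Str.isIn "envision" desc then "argen_envision"
    else if ADZ_ROUTE_KEYWORDS.any (fun k => PySem.Str.isIn k desc) then
      routeLoopA rest "argen_adzir"
    else routeLoopA rest route

def route_from_services (services : List (List (String × String))) : String :=
  routeLoopA services "regular"

-- ===== PORT B =====
def descB (s : List (String × String)) : String :=
  PySem.Str.lower
    ((match (s.find? (fun p => p.1 == "description")).map (·.2) with
      | some d => if d = "" then ((s.find? (fun p => p.1 == "service_description")).map (·.2)).getD "" else d
      | none => ((s.find? (fun p => p.1 == "service_description")).map (·.2)).getD ""))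

def route_from_services_alt (services : List (List (String × String))) : String :=
  if services.any (fun s => PySem.Str.isIn "envision" (descB s)) then "argen_envision"
  else if services.any (fun s => ["adzir", "argenz", "emax zirconia"].any (fun k => PySem.Str.isIn k (descB s))) then "argen_adzir"
  else "regular"

-- ===== PRECONDITION & SPEC =====
def Spec_route_from_services (services : List (List (String × String))) (out : String) : Prop := out = route_from_services_alt services
instance (services : List (List (String × String))) (out : String) : Decidable (Spec_route_from_services services out) := by unfold Spec_route_from_services; infer_instance

-- ===== CLAIM (what is proved, stated in full; the proofs are below) =====
def Claim_equal_route_from_services : Prop := ∀ (services : List (List (String × String))), Dom_route_from_services services → Spec_route_from_services services (route_from_services services)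

-- ===== LEMMAS AND PROOFS =====
theorem descA_eq_descB (s : List (String × String)) : descA s = descB s := by
  simp only [descA, descB, pvOrA, pvGetA]
  cases (s.find? (fun p => p.1 == "description")).map (·.2) with
  | none => rfl
  | some d => by_cases h : d = "" <;> simp [h]

theorem routeLoopA_char (services : List (List (String × String))) (route : String) :
    routeLoopA services route =
      if services.any (fun s => PySem.Str.isIn "envision" (descB s)) then "argen_envision"
      else if services.any (fun s => ["adzir", "argenz", "emax zirconia"].any (fun k => PySem.Str.isIn k (descB s))) then "argen_adzir"
      else route := by
  induction services generalizing route with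
  | nil => simp [routeLoopA]
  | cons s rest ih =>
    simp only [routeLoopA, descA_eq_descB]
    by_cases h1 : PySem.Str.isIn "envision" (descB s) = true <;>
      by_cases h2 : (["adzir", "argenz", "emax zirconia"].any (fun k => PySem.Str.isIn k (descB s))) = true <;>
        simp_all [List.any_cons, ADZ_ROUTE_KEYWORDS]

-- ===== VERDICT (by name: the statement is the Claim_ definition above) =====
theorem route_from_services_spec : Claim_equal_route_from_services := by
  intro services _
  unfold Spec_route_from_services route_from_services route_from_services_alt
  rw [routeLoopA_char]
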